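-- pv_equiv track=rewrite | github.com/adamanldo/advent_of_code | 2024/2.py | is_safe_without
-- ===== SOURCE A (Python) =====
-- def is_safe_without(levels, idx):
--     levels = levels[:idx] + levels[idx + 1 :]
--     all_decreasing, all_increasing = True, True
--     within_distance = True
--     for i in range(1, len(levels)):
--         if levels[i] < levels[i - 1]:
--             all_increasing = False
--         if levels[i] > levels[i - 1]:
--             all_decreasing = False
--         if not 1 <= abs((levels[i] - levels[i - 1])) <= 3:
--             within_distance = False
--     if (all_increasing or all_decreasing) and within_distance:
--         return True
--     else:
--         return False
-- ===== SOURCE B (Python) =====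
-- def is_safe_without(levels, idx):
--     l = levels[:idx] + levels[idx + 1:]
--     diffs = [b - a for a, b in zip(l, l[1:])]
--     if not diffs:
--         return True
--     m, M = min(diffs), max(diffs)
--     return (1 <= m and M <= 3) or (-3 <= m and M <= -1)
-- ===== Notes on version B (the rewrite author's own statement) =====
-- stated objective: alternative
-- what changed: Instead of A's three boolean flags updated per adjacent pair in an indexed loop, B pairs neighbours with zip, aggregates the consecutive differences to their min and max, and decides safety from those two extremes alone (safe iff 1<=min and max<=3, or -3<=min and max<=-1); correct because a uniform signed range on all differences is exactly a bound on their extremes.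
import Mathlib
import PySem

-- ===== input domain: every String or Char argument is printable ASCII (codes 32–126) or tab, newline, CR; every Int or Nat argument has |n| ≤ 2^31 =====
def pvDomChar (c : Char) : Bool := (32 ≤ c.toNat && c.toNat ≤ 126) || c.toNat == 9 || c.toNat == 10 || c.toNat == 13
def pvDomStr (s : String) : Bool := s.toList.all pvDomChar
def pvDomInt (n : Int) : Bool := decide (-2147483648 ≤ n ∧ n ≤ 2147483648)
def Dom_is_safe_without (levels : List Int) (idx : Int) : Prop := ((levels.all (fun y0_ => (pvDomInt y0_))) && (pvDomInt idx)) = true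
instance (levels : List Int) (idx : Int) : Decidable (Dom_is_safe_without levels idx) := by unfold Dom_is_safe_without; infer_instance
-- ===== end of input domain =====

-- B replaces A's three per-pair boolean flags by aggregating the consecutive
-- differences (paired via zip) to their min and max and deciding safety from
-- those two extremes alone; same O(n) cost, a different reduction of the data.

-- ===== PORT A =====
-- loop body of A: one step updates the three flags (all_increasing, all_decreasing, within_distance)
def pvStepA (l : List Int) : Bool × Bool × Bool → Int → Bool × Bool × Bool
  | (inc, dec, w), i =>
    let cur := PySem.List.pyGetD l i 0
    let prev := PySem.List.pyGetD l (i - 1) 0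
    ((if cur < prev then false else inc),
     (if prev < cur then false else dec),
     (if ¬ (1 ≤ |cur - prev| ∧ |cur - prev| ≤ 3) then false else w))

def is_safe_without (levels : List Int) (idx : Int) : Bool :=
  let l := PySem.List.slice levels none (some idx) ++ PySem.List.slice levels (some (idx + 1)) none
  let st := (PySem.List.pyRange 1 (l.length : Int) 1).foldl (pvStepA l) (true, true, true)
  if (st.1 || st.2.1) && st.2.2 then true else false

-- ===== PORT B =====
def is_safe_without_alt (levels : List Int) (idx : Int) : Bool :=
  let l := PySem.List.slice levels none (some idx) ++ PySem.List.slice levels (some (idx + 1)) none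
  let diffs := (l.zip (l.drop 1)).map (fun p => p.2 - p.1)
  if diffs.isEmpty then true
  else
    let m : Int := (PySem.List.min? diffs (fun x => x)).getD 0
    let M : Int := (PySem.List.max? diffs (fun x => x)).getD 0
    (decide (1 ≤ m) && decide (M ≤ 3)) || (decide (-3 ≤ m) && decide (M ≤ -1))

-- ===== PRECONDITION & SPEC =====
def Spec_is_safe_without (levels : List Int) (idx : Int) (out : Bool) : Prop := out = is_safe_without_alt levels idx
instance (levels : List Int) (idx : Int) (out : Bool) : Decidable (Spec_is_safe_without levels idx out) := by unfold Spec_is_safe_without; infer_instance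

-- ===== CLAIM (what is proved, stated in full; the proofs are below) =====
def Claim_equal_is_safe_without : Prop := ∀ (levels : List Int) (idx : Int), Dom_is_safe_without levels idx → Spec_is_safe_without levels idx (is_safe_without levels idx)

-- ===== LEMMAS AND PROOFS =====

lemma pv_if_false (c : Prop) [Decidable c] (b : Bool) : (if c then false else b) = (!decide c && b) := by
  split_ifs with h <;> simp [h]

lemma pv_if_bool (b : Bool) : (if b = true then true else false) = b := by
  cases b <;> simp

-- A's fold computes, in each component, the initial flag AND-ed with an `all` over the indices
lemma pv_foldA (l : List Int) (idxs : List Int) (inc dec w : Bool) :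
    idxs.foldl (pvStepA l) (inc, dec, w) =
      (inc && idxs.all (fun i => !decide (PySem.List.pyGetD l i 0 < PySem.List.pyGetD l (i - 1) 0)),
       dec && idxs.all (fun i => !decide (PySem.List.pyGetD l (i - 1) 0 < PySem.List.pyGetD l i 0)),
       w && idxs.all (fun i => decide (1 ≤ |PySem.List.pyGetD l i 0 - PySem.List.pyGetD l (i - 1) 0|
              ∧ |PySem.List.pyGetD l i 0 - PySem.List.pyGetD l (i - 1) 0| ≤ 3))) := by
  induction idxs generalizing inc dec w with
  | nil => simp
  | cons x xs ih =>
    rw [List.foldl_cons]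
    simp only [pvStepA, pv_if_false, decide_not, Bool.not_not]
    rw [ih]
    simp only [List.all_cons]
    refine Prod.ext ?_ (Prod.ext ?_ ?_) <;> dsimp only <;>
      cases inc <;> cases dec <;> cases w <;> simp [Bool.and_assoc]

lemma pv_all_and (l : List Int) (p q : Int → Bool) :
    (l.all p && l.all q) = l.all (fun x => p x && q x) := by
  induction l with
  | nil => simp
  | cons a t ih =>
    simp only [List.all_cons, ← ih]
    cases p a <;> cases q a <;> simp

-- pointwise: non-decrease plus 1 ≤ |d| ≤ 3 is exactly 1 ≤ d ≤ 3
lemma pv_pt_up (x y : Int) :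
    (!decide (x < y) && decide (1 ≤ |x - y| ∧ |x - y| ≤ 3))
      = (decide (1 ≤ x - y) && decide (x - y ≤ 3)) := by
  rcases abs_cases (x - y) with ⟨h1, h2⟩ | ⟨h1, h2⟩ <;> rw [h1, Bool.eq_iff_iff] <;>
    simp only [Bool.and_eq_true, Bool.not_eq_true', decide_eq_false_iff_not,
      decide_eq_true_eq] <;> omega

-- pointwise: non-increase plus 1 ≤ |d| ≤ 3 is exactly -3 ≤ d ≤ -1
lemma pv_pt_down (x y : Int) :
    (!decide (y < x) && decide (1 ≤ |x - y| ∧ |x - y| ≤ 3))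
      = (decide (-3 ≤ x - y) && decide (x - y ≤ -1)) := by
  rcases abs_cases (x - y) with ⟨h1, h2⟩ | ⟨h1, h2⟩ <;> rw [h1, Bool.eq_iff_iff] <;>
    simp only [Bool.and_eq_true, Bool.not_eq_true', decide_eq_false_iff_not,
      decide_eq_true_eq] <;> omega

-- the indexed difference sequence of A equals B's zip-built difference list
lemma pv_diffs_eq (l : List Int) :
    (PySem.List.pyRange 1 (l.length : Int) 1).map
        (fun i => PySem.List.pyGetD l i 0 - PySem.List.pyGetD l (i - 1) 0)
      = (l.zip (l.drop 1)).map (fun p => p.2 - p.1) := by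
  apply List.ext_getElem
  · simp [PySem.List.length_pyRange_one]
  · intro k h1 h2
    simp only [List.getElem_map, List.getElem_zip, List.getElem_drop]
    have hk : k < (PySem.List.pyRange 1 (l.length : Int) 1).length := by
      simpa using h1
    have hlen : k + 1 < l.length := by
      simp [PySem.List.length_pyRange_one] at hk; omega
    rw [PySem.List.getElem_pyRange_one 1 (l.length : Int) k hk]
    rw [PySem.List.pyGetD_eq_getElem l 0 (by omega) (by omega)]
    rw [show (1 : Int) + (k : Int) - 1 = (k : Int) by ring]
    rw [PySem.List.pyGetD_eq_getElem l 0 (by omega) (by omega)]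
    congr 1

-- B's min/max test over a difference list equals the two `all` range tests
lemma pv_minmax (ds : List Int) :
    (if ds.isEmpty then true
     else
       ((decide (1 ≤ ((PySem.List.min? ds (fun x => x)).getD 0)) &&
         decide (((PySem.List.max? ds (fun x => x)).getD 0) ≤ 3)) ||
        (decide (-3 ≤ ((PySem.List.min? ds (fun x => x)).getD 0)) &&
         decide (((PySem.List.max? ds (fun x => x)).getD 0) ≤ -1))))
      = (ds.all (fun d => decide (1 ≤ d) && decide (d ≤ 3)) ||
         ds.all (fun d => decide (-3 ≤ d) && decide (d ≤ -1))) := by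
  cases hds : ds with
  | nil => simp
  | cons a t =>
    rw [← hds]
    have hne : ds ≠ [] := by rw [hds]; simp
    obtain ⟨m, hm⟩ : ∃ m, PySem.List.min? ds (fun x => x) = some m := by
      cases h : PySem.List.min? ds (fun x => x) with
      | none => exact absurd ((PySem.List.min?_eq_none_iff ds _).mp h) hne
      | some m => exact ⟨m, rfl⟩
    obtain ⟨M, hM⟩ : ∃ M, PySem.List.max? ds (fun x => x) = some M := by
      cases h : PySem.List.max? ds (fun x => x) with
      | none =>
        exact absurd ((PySem.List.max?_eq_none_iff ds _).mp h) hne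
      | some M => exact ⟨M, rfl⟩
    have hmm := PySem.List.min?_mem hm
    have hMm := PySem.List.max?_mem hM
    have hmin := PySem.List.min?_isMin hm
    have hmax := PySem.List.max?_isMax hM
    rw [if_neg (by simp [hds]), hm, hM, Bool.eq_iff_iff]
    simp only [Option.getD_some, Bool.or_eq_true, Bool.and_eq_true, decide_eq_true_eq,
      List.all_eq_true]
    constructor
    · rintro (⟨h1, h2⟩ | ⟨h1, h2⟩)
      · exact Or.inl (fun d hd => ⟨le_trans h1 (hmin d hd), le_trans (hmax d hd) h2⟩)
      · exact Or.inr (fun d hd => ⟨le_trans h1 (hmin d hd), le_trans (hmax d hd) h2⟩)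
    · rintro (h | h)
      · exact Or.inl ⟨(h m hmm).1, (h M hMm).2⟩
      · exact Or.inr ⟨(h m hmm).1, (h M hMm).2⟩

-- ===== VERDICT (by name: the statement is the Claim_ definition above) =====
theorem is_safe_without_spec : Claim_equal_is_safe_without := by
  intro levels idx _
  unfold Spec_is_safe_without is_safe_without is_safe_without_alt
  dsimp only
  generalize (PySem.List.slice levels none (some idx) ++
      PySem.List.slice levels (some (idx + 1)) none) = l
  rw [pv_foldA]
  dsimp only
  simp only [Bool.true_and, pv_if_bool]
  rw [show ∀ a b c : Bool, ((a || b) && c) = (a && c || b && c) from by decide,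
      pv_all_and, pv_all_and]
  rw [pv_minmax, ← pv_diffs_eq, List.all_map, List.all_map]
  congr 1
  · exact congrArg _ (funext fun i => pv_pt_up _ _)
  · exact congrArg _ (funext fun i => pv_pt_down _ _)
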